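-- pv_equiv track=rewrite | github.com/mminhou/algorithm | 10.13/16968-차량번호판1.py | dfs
-- ===== SOURCE A (Python) =====
-- def dfs(s, index, prev):
--     if index == len(s):
--         return 1
--     start = ord('a') if s[index] == 'c' else ord('0')
--     end = ord('z') if s[index] == 'c' else ord('9')
--     ans = 0
--     for i in range(start, end+1):
--         if i != prev:
--             ans += dfs(s, index+1, i)
--     return ans
-- ===== SOURCE B (Python) =====
-- def dfs(s, index, prev):
--     total = 1
--     for j in range(index, len(s)):
--         lo, hi = (ord('a'), ord('z')) if s[j] == 'c' else (ord('0'), ord('9'))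
--         if j == index:
--             clash = lo <= prev <= hi
--         else:
--             clash = (s[j] == 'c') == (s[j - 1] == 'c')
--         total *= (hi - lo + 1) - clash
--     return total
-- ===== Notes on version B (the rewrite author's own statement) =====
-- stated objective: faster
-- what changed: Replaced the exponential branching recursion (summing over every admissible character at every position) by a single linear pass multiplying per-position choice counts: alphabet size, minus one when the previous position uses the same alphabet (or, at the first position, when prev lies in the current alphabet).
import Mathlib
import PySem

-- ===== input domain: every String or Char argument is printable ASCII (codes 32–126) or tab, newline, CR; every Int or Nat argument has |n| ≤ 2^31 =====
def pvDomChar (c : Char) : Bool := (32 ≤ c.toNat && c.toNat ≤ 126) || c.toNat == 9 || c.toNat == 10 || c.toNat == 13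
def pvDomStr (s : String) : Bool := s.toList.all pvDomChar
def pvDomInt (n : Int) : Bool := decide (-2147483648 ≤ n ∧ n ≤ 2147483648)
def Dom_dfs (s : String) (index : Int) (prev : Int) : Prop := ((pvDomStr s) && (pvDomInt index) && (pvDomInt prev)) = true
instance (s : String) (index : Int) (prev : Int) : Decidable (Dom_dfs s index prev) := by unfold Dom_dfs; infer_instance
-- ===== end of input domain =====

-- B replaces A's exponential branching recursion by one linear pass multiplying
-- per-position choice counts (objective: faster, asymptotically).

-- ===== PORT A =====
-- Fuel-driven transliteration of A's recursion; fuel (len - index) + 1 always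
-- suffices, the fuel guard only makes the same computation total.
def dfsF : Nat → String → Int → Int → Int
  | 0, _, _, _ => 0
  | n+1, s, index, prev =>
    if index = PySem.Str.len s then 1
    else
      match PySem.Str.pyGet? s index with
      | none => 0   -- Python raises IndexError here; excluded by Pre_dfs
      | some c =>
        let start : Int := if c = 'c' then 97 else 48
        let e : Int := if c = 'c' then 122 else 57
        (PySem.List.pyRange start (e + 1) 1).foldl
          (fun ans i => if i ≠ prev then ans + dfsF n s (index + 1) i else ans) 0

def dfs (s : String) (index : Int) (prev : Int) : Int :=
  dfsF ((PySem.Str.len s - index).toNat + 1) s index prev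

-- ===== PORT B =====
-- loop body of Source B's single pass (one helper, kept named for the proofs)
def altStep (s : String) (index : Int) (prev : Int) (total : Int) (j : Int) : Int :=
  let c : Char := (PySem.Str.pyGet? s j).getD ' '
  let lo : Int := if c = 'c' then 97 else 48
  let hi : Int := if c = 'c' then 122 else 57
  let clash : Bool :=
    if j = index then decide (lo ≤ prev ∧ prev ≤ hi)
    else (c == 'c') == (((PySem.Str.pyGet? s (j - 1)).getD ' ') == 'c')
  total * ((hi - lo + 1) - (if clash then 1 else 0))

def dfs_alt (s : String) (index : Int) (prev : Int) : Int :=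
  (PySem.List.pyRange index (PySem.Str.len s) 1).foldl (altStep s index prev) 1

-- ===== PRECONDITION & SPEC =====
-- Pre_: exactly the inputs where Python A returns (s[index] never raises
-- IndexError during the recursion): -len(s) ≤ index ≤ len(s).
def Pre_dfs (s : String) (index : Int) (prev : Int) : Prop :=
  -PySem.Str.len s ≤ index ∧ index ≤ PySem.Str.len s

instance (s : String) (index : Int) (prev : Int) : Decidable (Pre_dfs s index prev) := by
  unfold Pre_dfs; infer_instance

def pvWitness_dfs : String × Int × Int := ("c0c", 0, 0)

def Spec_dfs (s : String) (index : Int) (prev : Int) (out : Int) : Prop := out = dfs_alt s index prev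
instance (s : String) (index : Int) (prev : Int) (out : Int) : Decidable (Spec_dfs s index prev out) := by unfold Spec_dfs; infer_instance

-- ===== CLAIM (what is proved, stated in full; the proofs are below) =====
def Claim_equal_dfs : Prop := ∀ (s : String) (index : Int) (prev : Int), Dom_dfs s index prev → Pre_dfs s index prev → Spec_dfs s index prev (dfs s index prev)

-- ===== LEMMAS AND PROOFS =====

-- character at Python index j (negative = from the end), defaulted
def chAt (s : String) (j : Int) : Char := (PySem.Str.pyGet? s j).getD ' '

def loOf (c : Char) : Int := if c = 'c' then 97 else 48
def hiOf (c : Char) : Int := if c = 'c' then 122 else 57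

-- tail product: the dfs_alt factors for m positions starting at j (j > index)
def tp (s : String) (j : Int) : Nat → Int
  | 0 => 1
  | m+1 =>
      ((hiOf (chAt s j) - loOf (chAt s j) + 1)
        - (if (chAt s j == 'c') == (chAt s (j-1) == 'c') then 1 else 0))
      * tp s (j+1) m

theorem pv_chAt_some (s : String) (j : Int) (h1 : -PySem.Str.len s ≤ j) (h2 : j < PySem.Str.len s) :
    PySem.Str.pyGet? s j = some (chAt s j) := by
  have hnone : PySem.Str.pyGet? s j ≠ none := by
    simp only [PySem.Str.len_eq, String.length_toList] at h1 h2
    simp [PySem.List.pyGet?_eq_none_iff, PySem.Raise.InRange]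
    omega
  cases hc : PySem.Str.pyGet? s j with
  | none => exact absurd hc hnone
  | some c => simp only [chAt, hc, Option.getD_some]

theorem pv_foldl_const (L : List Int) (g : Int → Int) (K prev : Int)
    (hg : ∀ i ∈ L, g i = K) (a : Int) :
    L.foldl (fun ans i => if i ≠ prev then ans + g i else ans) a
      = a + K * ((L.filter (fun i => decide (i ≠ prev))).length : Int) := by
  induction L generalizing a with
  | nil => simp
  | cons x xs ih =>
    have hx : g x = K := hg x (by simp)
    have hxs : ∀ i ∈ xs, g i = K := fun i hi => hg i (by simp [hi])
    rw [List.foldl_cons, List.filter_cons]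
    by_cases h : x = prev
    · subst h
      rw [if_neg (by simp), if_neg (by simp)]
      exact ih hxs a
    · rw [if_pos h, if_pos (by simp [h]), List.length_cons]
      push_cast
      rw [ih hxs, hx]
      ring

theorem pv_filter_range (b prev : Int) : ∀ (m : Nat) (a : Int), a + m = b →
    (((PySem.List.pyRange a b 1).filter (fun i => decide (i ≠ prev))).length : Int)
      = (b - a) - (if a ≤ prev ∧ prev < b then 1 else 0) := by
  intro m
  induction m with
  | zero =>
    intro a ha
    rw [PySem.List.pyRange_one_eq_nil (by omega)]
    simp
    omega
  | succ m ih =>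
    intro a ha
    push_cast at ha
    rw [PySem.List.pyRange_one_cons (by omega), List.filter_cons]
    by_cases h : a = prev
    · rw [if_neg (by simp [h]), ih (a + 1) (by omega)]
      split_ifs <;> omega
    · rw [if_pos (by simp [h]), List.length_cons]
      push_cast
      rw [ih (a + 1) (by omega)]
      split_ifs <;> omega

theorem pv_altStep_ne (s : String) (index prev total j : Int) (h : j ≠ index) :
    altStep s index prev total j
      = total * ((hiOf (chAt s j) - loOf (chAt s j) + 1)
          - (if (chAt s j == 'c') == (chAt s (j-1) == 'c') then 1 else 0)) := by
  simp only [altStep, chAt, loOf, hiOf, if_neg h]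
  rfl

theorem pv_altStep_eq (s : String) (index prev total : Int) :
    altStep s index prev total index
      = total * ((hiOf (chAt s index) - loOf (chAt s index) + 1)
          - (if loOf (chAt s index) ≤ prev ∧ prev ≤ hiOf (chAt s index) then 1 else 0)) := by
  simp only [altStep, chAt, loOf, hiOf]
  simp only [if_pos, decide_eq_true_eq]
  split_ifs <;> rfl

theorem pv_tail_fold (s : String) (index prev : Int) :
    ∀ (m : Nat) (j acc : Int), index < j → j + m = PySem.Str.len s →
    (PySem.List.pyRange j (PySem.Str.len s) 1).foldl (altStep s index prev) acc
      = acc * tp s j m := by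
  intro m
  induction m with
  | zero =>
    intro j acc hj hlen
    rw [PySem.List.pyRange_one_eq_nil (by omega)]
    simp [tp]
  | succ m ih =>
    intro j acc hj hlen
    push_cast at hlen
    rw [PySem.List.pyRange_one_cons (by omega), List.foldl_cons,
        pv_altStep_ne s index prev acc j (by omega),
        ih (j + 1) _ (by omega) (by omega), tp]
    ring

-- closed form for dfs_alt at the head position
theorem pv_alt_closed (s : String) (index prev : Int)
    (h1 : -PySem.Str.len s ≤ index) (h2 : index < PySem.Str.len s) :
    dfs_alt s index prev
      = ((hiOf (chAt s index) - loOf (chAt s index) + 1)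
          - (if loOf (chAt s index) ≤ prev ∧ prev ≤ hiOf (chAt s index) then 1 else 0))
        * tp s (index + 1) (PySem.Str.len s - (index + 1)).toNat := by
  rw [dfs_alt, PySem.List.pyRange_one_cons (by omega), List.foldl_cons, pv_altStep_eq,
      pv_tail_fold s index prev ((PySem.Str.len s - (index + 1)).toNat) (index + 1) _
        (by omega) (by omega)]
  ring

theorem pv_alt_len (s : String) (index prev : Int) (h : index = PySem.Str.len s) :
    dfs_alt s index prev = 1 := by
  rw [dfs_alt, PySem.List.pyRange_one_eq_nil (by omega)]
  rfl

theorem pv_lo_le_hi (c : Char) : loOf c ≤ hiOf c := by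
  by_cases h : c = 'c' <;> simp [loOf, hiOf, h]

-- for i in the alphabet of position index, the value of dfs_alt at index+1 is the tail product
theorem pv_alt_tp (s : String) (index i : Int)
    (h1 : -PySem.Str.len s ≤ index) (h2 : index < PySem.Str.len s)
    (hlo : loOf (chAt s index) ≤ i) (hhi : i ≤ hiOf (chAt s index)) :
    dfs_alt s (index + 1) i = tp s (index + 1) (PySem.Str.len s - (index + 1)).toNat := by
  by_cases hl : index + 1 = PySem.Str.len s
  · rw [pv_alt_len s (index + 1) i hl]
    have hz : (PySem.Str.len s - (index + 1)).toNat = 0 := by omega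
    rw [hz]
    rfl
  · have h2' : index + 1 < PySem.Str.len s := by
      have := lt_of_le_of_ne (by omega : index + 1 ≤ PySem.Str.len s) hl
      exact this
    rw [pv_alt_closed s (index + 1) i (by omega) h2']
    have hm : (PySem.Str.len s - (index + 1)).toNat
        = (PySem.Str.len s - (index + 1 + 1)).toNat + 1 := by omega
    rw [hm, tp]
    have hsub : index + 1 - 1 = index := by ring
    rw [hsub]
    have hif : (if loOf (chAt s (index + 1)) ≤ i ∧ i ≤ hiOf (chAt s (index + 1)) then (1:Int) else 0)
        = (if (chAt s (index + 1) == 'c') == (chAt s index == 'c') then 1 else 0) := by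
      by_cases hc : chAt s index = 'c' <;> by_cases hc' : chAt s (index + 1) = 'c' <;>
        simp only [loOf, hiOf, hc, hc', if_pos, if_neg, beq_iff_eq] at hlo hhi ⊢ <;>
        simp [hc, hc'] at hlo hhi ⊢ <;> omega
    rw [hif]

theorem pv_main (s : String) : ∀ (n : Nat) (index prev : Int),
    -PySem.Str.len s ≤ index → index ≤ PySem.Str.len s → (PySem.Str.len s - index).toNat < n →
    dfsF n s index prev = dfs_alt s index prev := by
  intro n
  induction n with
  | zero => intro _ _ _ _ h; omega
  | succ n ih =>
    intro index prev h1 h2 hfuel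
    by_cases hl : index = PySem.Str.len s
    · rw [dfsF, if_pos hl, pv_alt_len s index prev hl]
    · have h2' : index < PySem.Str.len s := lt_of_le_of_ne h2 hl
      rw [dfsF, if_neg hl, pv_chAt_some s index h1 h2']
      simp only
      have hg : ∀ i ∈ PySem.List.pyRange (loOf (chAt s index)) (hiOf (chAt s index) + 1) 1,
          dfsF n s (index + 1) i = tp s (index + 1) (PySem.Str.len s - (index + 1)).toNat := by
        intro i hi
        rw [PySem.List.mem_pyRange_one] at hi
        rw [ih (index + 1) i (by omega) (by omega) (by omega)]
        exact pv_alt_tp s index i h1 h2' hi.1 (by omega)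
      have hfold := pv_foldl_const
        (PySem.List.pyRange (loOf (chAt s index)) (hiOf (chAt s index) + 1) 1)
        (fun i => dfsF n s (index + 1) i)
        (tp s (index + 1) (PySem.Str.len s - (index + 1)).toNat) prev hg 0
      simp only [loOf, hiOf] at hfold
      rw [hfold]
      have hcnt := pv_filter_range (hiOf (chAt s index) + 1) prev
        ((hiOf (chAt s index) + 1 - loOf (chAt s index)).toNat) (loOf (chAt s index))
        (by have := pv_lo_le_hi (chAt s index); omega)
      simp only [loOf, hiOf] at hcnt
      rw [hcnt, pv_alt_closed s index prev h1 h2']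
      have hiff : (loOf (chAt s index) ≤ prev ∧ prev < hiOf (chAt s index) + 1)
          ↔ (loOf (chAt s index) ≤ prev ∧ prev ≤ hiOf (chAt s index)) := by omega
      simp only [loOf, hiOf] at hiff ⊢
      simp only [hiff]
      ring


-- ===== VERDICT (by name: the statement is the Claim_ definition above) =====
theorem dfs_spec : Claim_equal_dfs := by
  intro s index prev _ hpre
  unfold Spec_dfs dfs
  exact pv_main s ((PySem.Str.len s - index).toNat + 1) index prev hpre.1 hpre.2 (by omega)
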